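-- pv_equiv track=rewrite | github.com/liupengsay/PyIsTheBestLang | source/mathmatics/lexico_graphical_order/template.py | get_kth_subset
-- ===== SOURCE A (Python) =====
-- def get_kth_subset(n, k):
--     # The k-th smallest subset of set [1,...,n], with a total of 1<<n subsets
--     # assert k <= (1 << n)
--     ans = []
--     if k == 1:
--         # Empty subset output 0
--         ans.append(0)
--     k -= 1
--     for i in range(1, n + 1):
--         if k == 0:
--             break
--         if k <= pow(2, n - i):
--             ans.append(i)
--             k -= 1
--         else:
--             k -= pow(2, n - i)
--     return ans
-- ===== SOURCE B (Python) =====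
-- def get_kth_subset(n, k):
--     # Unrank directly: jump to each included element with bit_length instead of
--     # scanning every index.  Out-of-range ranks (k <= 0 or k > 2**n) yield [].
--     if k == 1:
--         return [0]
--     ans = []
--     r = k - 1
--     s = max(n, 0)
--     p = 0
--     while 0 < r < (1 << s):
--         d = s - ((1 << s) - r).bit_length() + 1
--         ans.append(p + d)
--         r -= (1 << s) - (1 << (s - d + 1)) + 1
--         s -= d
--         p += d
--     return ans
-- ===== Notes on version B (the rewrite author's own statement) =====
-- stated objective: faster
-- what changed: B unranks directly: instead of scanning indices 1..n one by one, a bit_length computation jumps straight to each included element, so the loop runs once per output element rather than once per index.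
-- intended difference: For k <= 0 with n >= 1 (rank below the valid range 1..2^n) A returns the full set [1..n] because its leftover negative counter passes every comparison, while B returns [] exactly as both programs do for the symmetric out-of-range side k > 2^n; the empty answer is the intended one for an out-of-range rank. — e.g. on get_kth_subset(2, 0): A returns [1, 2], B returns []
import Mathlib
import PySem

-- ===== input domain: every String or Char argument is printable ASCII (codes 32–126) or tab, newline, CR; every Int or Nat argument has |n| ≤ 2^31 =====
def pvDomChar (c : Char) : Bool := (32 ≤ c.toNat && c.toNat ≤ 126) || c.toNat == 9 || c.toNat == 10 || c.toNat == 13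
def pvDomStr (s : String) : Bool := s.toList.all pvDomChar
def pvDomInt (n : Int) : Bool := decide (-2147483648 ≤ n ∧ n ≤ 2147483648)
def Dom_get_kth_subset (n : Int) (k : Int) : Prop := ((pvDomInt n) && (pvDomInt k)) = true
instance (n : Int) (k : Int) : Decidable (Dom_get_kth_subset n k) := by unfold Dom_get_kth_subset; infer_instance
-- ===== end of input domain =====

-- B replaces A's index-by-index scan with a bit_length jump straight to each included element;
-- on out-of-range k ≤ 0 (with n ≥ 1) B returns [] where A's leftover negative counter accidentally
-- yields the full set — stated as the intended difference D_ below.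

-- ===== PORT A =====
-- A's for-loop over range(1, n+1) with break, state (k, ans); pow(2, n-i) is only
-- evaluated with i ≤ n inside the loop, so (n - i).toNat is exact there.
def getKthLoopA (n : Int) : List Int → Int → List Int → List Int
  | [], _, ans => ans
  | i :: rest, k, ans =>
    if k = 0 then ans
    else if k ≤ 2 ^ (n - i).toNat then getKthLoopA n rest (k - 1) (ans ++ [i])
    else getKthLoopA n rest (k - 2 ^ (n - i).toNat) ans

def get_kth_subset (n : Int) (k : Int) : List Int :=
  getKthLoopA n (PySem.List.pyRange 1 (n + 1)) (k - 1) (if k = 1 then [0] else [])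

-- ===== PORT B =====
-- bit-length bracket facts (cited by altLoop's decreasing_by, so they live above the port)
theorem pvBitLen_pos {x : Int} (hx : 0 < x) : 1 ≤ PySem.Int.bitLength x := by
  by_contra h
  have h0 : PySem.Int.bitLength x = 0 := by omega
  have := PySem.Int.lt_two_pow_bitLength x
  rw [h0] at this
  omega

theorem pvBitLen_le {x : Int} {S : Nat} (hx : 0 < x) (h : x < 2 ^ S) :
    PySem.Int.bitLength x ≤ S := by
  by_contra hc
  have h1 : 2 ^ S ≤ 2 ^ (PySem.Int.bitLength x - 1) :=
    Nat.pow_le_pow_right (by norm_num) (by omega)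
  have h2 := PySem.Int.two_pow_bitLength_le x (by omega)
  have h3 : x.natAbs < 2 ^ S := by
    have : ((x.natAbs : Int)) < ((2 ^ S : Nat) : Int) := by
      rw [Int.natAbs_of_nonneg (le_of_lt hx)]
      push_cast
      exact h
    exact_mod_cast this
  omega

-- B's while-loop: r = remaining 0-based rank, s = elements still available, p = last chosen
def altLoop (r s p : Int) : List Int :=
  if h : 0 < r ∧ r < 2 ^ s.toNat then
    -- d = s - ((1 << s) - r).bit_length() + 1; under the guard s ≥ 1 and all shift
    -- amounts are ≥ 0, so the .toNat exponents are exact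
    let d : Int := s - ((PySem.Int.bitLength (2 ^ s.toNat - r) : Int) - 1)
    (p + d) :: altLoop (r - (2 ^ s.toNat - 2 ^ (s - d + 1).toNat) - 1) (s - d) (p + d)
  else []
termination_by s.toNat
decreasing_by
  have hS1 : 1 ≤ s.toNat := by
    by_contra hc
    have : s.toNat = 0 := by omega
    rw [this] at h
    omega
  have hs : ((s.toNat : Int)) = s := Int.toNat_of_nonneg (by omega)
  have hx0 : (0 : Int) < 2 ^ s.toNat - r := by
    have := h.2; omega
  have hB1 := pvBitLen_pos hx0
  have hB2 : PySem.Int.bitLength (2 ^ s.toNat - r) ≤ s.toNat :=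
    pvBitLen_le hx0 (by have := h.1; omega)
  omega

def get_kth_subset_alt (n : Int) (k : Int) : List Int :=
  if k = 1 then [0] else altLoop (k - 1) (max n 0) 0

-- ===== PRECONDITION & SPEC =====
-- For k ≤ 0 with n ≥ 1 (a rank below the valid range 1..2^n), A returns the full set [1..n]
-- because its leftover negative counter passes every comparison, while B returns [] exactly as
-- both do for the symmetric out-of-range side k > 2^n — the empty answer is the intended one.
def D_get_kth_subset (n : Int) (k : Int) : Prop := 1 ≤ n ∧ k ≤ 0
instance (n : Int) (k : Int) : Decidable (D_get_kth_subset n k) := by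
  unfold D_get_kth_subset; infer_instance

def Spec_get_kth_subset (n : Int) (k : Int) (out : List Int) : Prop :=
  ¬ D_get_kth_subset n k → out = get_kth_subset_alt n k
instance (n : Int) (k : Int) (out : List Int) : Decidable (Spec_get_kth_subset n k out) := by
  unfold Spec_get_kth_subset; infer_instance

def pvDiffWitness_get_kth_subset : Int × Int := (2, 0)
def pvDiffWitnessOut_get_kth_subset : (List Int) × (List Int) := ([1, 2], [])

-- ===== CLAIM (what is proved, stated in full; the proofs are below) =====
def Claim_unchanged_get_kth_subset : Prop := ∀ (n : Int) (k : Int), Dom_get_kth_subset n k → Spec_get_kth_subset n k (get_kth_subset n k)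
def Claim_changed_get_kth_subset : Prop := Dom_get_kth_subset (pvDiffWitness_get_kth_subset.1) (pvDiffWitness_get_kth_subset.2) ∧ D_get_kth_subset (pvDiffWitness_get_kth_subset.1) (pvDiffWitness_get_kth_subset.2) ∧ get_kth_subset (pvDiffWitness_get_kth_subset.1) (pvDiffWitness_get_kth_subset.2) = pvDiffWitnessOut_get_kth_subset.1 ∧ get_kth_subset_alt (pvDiffWitness_get_kth_subset.1) (pvDiffWitness_get_kth_subset.2) = pvDiffWitnessOut_get_kth_subset.2 ∧ pvDiffWitnessOut_get_kth_subset.1 ≠ pvDiffWitnessOut_get_kth_subset.2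
def Claim_exact_get_kth_subset : Prop := ∀ (n : Int) (k : Int), Dom_get_kth_subset n k → D_get_kth_subset n k → get_kth_subset n k ≠ get_kth_subset_alt n k

-- ===== LEMMAS AND PROOFS =====

theorem pvBitLen_gt {x : Int} {m : Nat} (h : (2 : Int) ^ m ≤ x) :
    m + 1 ≤ PySem.Int.bitLength x := by
  by_contra hc
  have h1 : 2 ^ PySem.Int.bitLength x ≤ 2 ^ m :=
    Nat.pow_le_pow_right (by norm_num) (by omega)
  have h2 := PySem.Int.lt_two_pow_bitLength x
  have h3 : ((2 ^ m : Nat) : Int) ≤ (x.natAbs : Int) := by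
    rw [Int.natAbs_of_nonneg (le_trans (by positivity) h)]
    push_cast
    exact h
  have h4 : (2 : Nat) ^ m ≤ x.natAbs := by exact_mod_cast h3
  omega


-- A's loop with counter 0 breaks at once
theorem loopA_zero (n : Int) (l : List Int) (ans : List Int) :
    getKthLoopA n l 0 ans = ans := by
  cases l with
  | nil => rfl
  | cons i rest => simp [getKthLoopA]

-- A's loop with rank beyond the remaining 2^S subsets skips everything
theorem loopA_ge (S : Nat) : ∀ (p r : Int) (ans : List Int), (2 : Int) ^ S ≤ r →
    getKthLoopA (p + S) (PySem.List.pyRange (p + 1) (p + S + 1)) r ans = ans := by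
  induction S with
  | zero =>
    intro p r ans _
    have hnil : PySem.List.pyRange (p + 1) (p + (0 : Nat) + 1) = [] := by
      rw [PySem.List.pyRange_one]
      simp
    rw [hnil]
    rfl
  | succ S ih =>
    intro p r ans hr
    have hcons := PySem.List.pyRange_one_cons
      (a := p + 1) (b := p + (S + 1 : Nat) + 1) (by push_cast; omega)
    rw [hcons]
    have h2S : (1 : Int) ≤ 2 ^ S := one_le_pow₀ (by norm_num)
    have hpow : (2 : Int) ^ S < 2 ^ (S + 1) := by
      rw [pow_succ]; omega
    have hne : r ≠ 0 := by omega
    have hexp : (p + (S + 1 : Nat) - (p + 1)).toNat = S := by push_cast; omega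
    rw [getKthLoopA, if_neg hne, hexp, if_neg (by omega)]
    have := ih (p + 1) (r - 2 ^ S) ans (by rw [pow_succ] at hr; omega)
    have harg1 : p + 1 + (S : Int) = p + (S + 1 : Nat) := by push_cast; ring
    rw [harg1] at this
    exact this

-- A's loop with a negative rank takes everything
theorem loopA_neg (S : Nat) : ∀ (p r : Int) (ans : List Int), r < 0 →
    getKthLoopA (p + S) (PySem.List.pyRange (p + 1) (p + S + 1)) r ans
      = ans ++ PySem.List.pyRange (p + 1) (p + S + 1) := by
  induction S with
  | zero =>
    intro p r ans _
    have hnil : PySem.List.pyRange (p + 1) (p + (0 : Nat) + 1) = [] := by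
      rw [PySem.List.pyRange_one]
      simp
    rw [hnil]
    simp [getKthLoopA]
  | succ S ih =>
    intro p r ans hr
    have hcons := PySem.List.pyRange_one_cons
      (a := p + 1) (b := p + (S + 1 : Nat) + 1) (by push_cast; omega)
    rw [hcons]
    have h2S : (1 : Int) ≤ 2 ^ S := one_le_pow₀ (by norm_num)
    have hexp : (p + (S + 1 : Nat) - (p + 1)).toNat = S := by push_cast; omega
    rw [getKthLoopA, if_neg (by omega : r ≠ 0), hexp, if_pos (by omega)]
    have := ih (p + 1) (r - 1) (ans ++ [p + 1]) (by omega)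
    have harg1 : p + 1 + (S : Int) = p + (S + 1 : Nat) := by push_cast; ring
    rw [harg1] at this
    rw [this]
    simp

-- one guarded unfolding of altLoop when the next element is taken (rank in the first half)
theorem alt_take (S : Nat) (r p : Int) (hS : 1 ≤ S) (h0 : 0 < r) (h1 : r ≤ 2 ^ (S - 1)) :
    altLoop r (S : Int) p = (p + 1) :: altLoop (r - 1) ((S : Int) - 1) (p + 1) := by
  have hSt : ((S : Int)).toNat = S := by omega
  have h2 : (2 : Int) ^ S = 2 ^ (S - 1) * 2 := by
    rw [← pow_succ]
    congr 1
    omega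
  have h2pos : (1 : Int) ≤ 2 ^ (S - 1) := one_le_pow₀ (by norm_num)
  have hlt : r < 2 ^ S := by omega
  have hB : PySem.Int.bitLength (2 ^ S - r) = S := by
    have h5 := pvBitLen_gt (x := 2 ^ S - r) (m := S - 1) (by omega)
    have h6 := pvBitLen_le (x := 2 ^ S - r) (S := S) (by omega) (by omega)
    omega
  rw [altLoop, dif_pos (by rw [hSt]; exact ⟨h0, hlt⟩)]
  simp only [hSt, hB]
  congr 1
  · omega
  · have hexp : ((S : Int) - ((S : Int) - ((S : Int) - 1)) + 1).toNat = S := by omega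
    rw [hexp]
    congr 1 <;> omega

-- one guarded unfolding of altLoop when the first remaining element is skipped
theorem alt_skip (S : Nat) (r p : Int) (hS : 1 ≤ S) (h0 : (2 : Int) ^ (S - 1) < r)
    (h1 : r < 2 ^ S) :
    altLoop r (S : Int) p = altLoop (r - 2 ^ (S - 1)) ((S : Int) - 1) (p + 1) := by
  have hSt : ((S : Int)).toNat = S := by omega
  have hSt1 : ((S : Int) - 1).toNat = S - 1 := by omega
  have h2 : (2 : Int) ^ S = 2 ^ (S - 1) * 2 := by
    rw [← pow_succ]
    congr 1
    omega
  have hx0 : (0 : Int) < 2 ^ S - r := by omega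
  have hB1 := pvBitLen_pos hx0
  have hB2 : PySem.Int.bitLength (2 ^ S - r) ≤ S - 1 :=
    pvBitLen_le hx0 (by omega)
  have harg : (2 : Int) ^ (S - 1) - (r - 2 ^ (S - 1)) = 2 ^ S - r := by omega
  conv_lhs => rw [altLoop]
  conv_rhs => rw [altLoop]
  rw [dif_pos (by rw [hSt]; exact ⟨by omega, by omega⟩),
      dif_pos (by rw [hSt1]; exact ⟨by omega, by omega⟩)]
  simp only [hSt, hSt1, harg]
  have hexpL : ((S : Int) - ((S : Int) - ((PySem.Int.bitLength (2 ^ S - r) : Int) - 1)) + 1).toNat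
      = PySem.Int.bitLength (2 ^ S - r) := by omega
  have hexpR : ((S : Int) - 1 - ((S : Int) - 1 - ((PySem.Int.bitLength (2 ^ S - r) : Int) - 1)) + 1).toNat
      = PySem.Int.bitLength (2 ^ S - r) := by omega
  rw [hexpL, hexpR]
  congr 1
  · omega
  · congr 1 <;> omega

theorem alt_nonpos (r s p : Int) (h : r ≤ 0) : altLoop r s p = [] := by
  rw [altLoop, dif_neg]
  omega

theorem alt_ge (r s p : Int) (h : 2 ^ s.toNat ≤ r) : altLoop r s p = [] := by
  rw [altLoop, dif_neg]
  omega

-- main correspondence: A's scan over the remaining positions equals B's jump loop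
theorem loopA_alt (S : Nat) : ∀ (p r : Int) (ans : List Int), 0 ≤ r → r < 2 ^ S →
    getKthLoopA (p + S) (PySem.List.pyRange (p + 1) (p + S + 1)) r ans
      = ans ++ altLoop r (S : Int) p := by
  induction S with
  | zero =>
    intro p r ans h0 h1
    have hr0 : r = 0 := by norm_num at h1; omega
    have hnil : PySem.List.pyRange (p + 1) (p + (0 : Nat) + 1) = [] := by
      rw [PySem.List.pyRange_one]
      simp
    rw [hnil, hr0, alt_nonpos _ _ _ (by omega)]
    simp [getKthLoopA]
  | succ S ih =>
    intro p r ans h0 h1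
    by_cases hr0 : r = 0
    · rw [hr0, loopA_zero, alt_nonpos _ _ _ (by omega)]
      simp
    have hcons := PySem.List.pyRange_one_cons
      (a := p + 1) (b := p + (S + 1 : Nat) + 1) (by push_cast; omega)
    have hexp : (p + (S + 1 : Nat) - (p + 1)).toNat = S := by push_cast; omega
    have hcast : ((S + 1 : Nat) : Int) - 1 = (S : Int) := by push_cast; ring
    have harg1 : p + 1 + (S : Int) = p + (S + 1 : Nat) := by push_cast; ring
    have hpow : (2 : Int) ^ (S + 1) = 2 ^ S * 2 := pow_succ 2 S
    rw [hcons, getKthLoopA, if_neg hr0, hexp]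
    by_cases hc : r ≤ 2 ^ S
    · rw [if_pos hc]
      have hIH := ih (p + 1) (r - 1) (ans ++ [p + 1]) (by omega) (by omega)
      rw [harg1] at hIH
      rw [hIH]
      have hT := alt_take (S + 1) r p (by omega) (by omega) (by simpa using hc)
      rw [hcast] at hT
      rw [hT]
      simp
    · rw [if_neg hc]
      have hIH := ih (p + 1) (r - 2 ^ S) ans (by omega) (by omega)
      rw [harg1] at hIH
      rw [hIH]
      have hK := alt_skip (S + 1) r p (by omega) (by simpa using not_le.mp hc)
        (by exact_mod_cast h1)
      rw [hcast] at hK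
      simp only [Nat.add_sub_cancel] at hK
      rw [hK]

-- ===== VERDICT (by name: the statement is the Claim_ definition above) =====
theorem get_kth_subset_spec : Claim_unchanged_get_kth_subset := by
  intro n k _ hD
  unfold get_kth_subset get_kth_subset_alt
  by_cases hk1 : k = 1
  · rw [hk1]
    norm_num [loopA_zero]
  rw [if_neg hk1, if_neg hk1]
  by_cases hn : n ≤ 0
  · have hmax : max n 0 = 0 := by omega
    have hnil : PySem.List.pyRange 1 (n + 1) = [] := by
      rw [PySem.List.pyRange_one]
      have : (n + 1 - 1).toNat = 0 := by omega
      rw [this]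
      simp
    rw [hnil, hmax]
    by_cases hr : k - 1 ≤ 0
    · rw [alt_nonpos _ _ _ hr]
      rfl
    · rw [alt_ge _ _ _ (by norm_num; omega)]
      rfl
  · have hn1 : 1 ≤ n := by omega
    have hk2 : 1 ≤ k - 1 := by
      rcases (not_and_or.mp hD) with h | h
      · omega
      · omega
    have hmax : max n 0 = n := by omega
    set S := n.toNat with hSdef
    have hnS : ((S : Int)) = n := by omega
    rw [hmax]
    by_cases hlt : k - 1 < 2 ^ S
    · have hIH := loopA_alt S 0 (k - 1) [] (by omega) hlt
      norm_num at hIH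
      rw [hnS] at hIH
      exact hIH
    · have hA := loopA_ge S 0 (k - 1) [] (by omega)
      norm_num at hA
      rw [hnS] at hA
      rw [hA, alt_ge _ _ _ (by exact_mod_cast not_lt.mp hlt)]

theorem get_kth_subset_changed : Claim_changed_get_kth_subset := by
  unfold Claim_changed_get_kth_subset
  refine ⟨by decide, by decide, by decide, ?_, by decide⟩
  show get_kth_subset_alt 2 0 = []
  rw [get_kth_subset_alt, if_neg (by decide)]
  exact alt_nonpos _ _ _ (by decide)

theorem get_kth_subset_tight : Claim_exact_get_kth_subset := by
  intro n k _ hD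
  obtain ⟨hn, hk⟩ := hD
  have hk1 : k ≠ 1 := by omega
  unfold get_kth_subset get_kth_subset_alt
  rw [if_neg hk1, if_neg hk1]
  rw [alt_nonpos _ _ _ (by omega)]
  set S := n.toNat with hSdef
  have hnS : ((S : Int)) = n := by omega
  have hA := loopA_neg S 0 (k - 1) [] (by omega)
  norm_num at hA
  rw [hnS] at hA
  rw [hA]
  intro hcontra
  have := PySem.List.length_pyRange_one 1 (n + 1)
  rw [hcontra] at this
  simp at this
  omega
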